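-- pv_equiv track=rewrite | github.com/rhinocodelab/netmancer-cli | a.py | has_network_data_changed
-- ===== SOURCE A (Python) =====
-- def has_network_data_changed(new_data, existing_data):
--     """Check if the network data has changed by comparing node IPs."""
--     existing_nodes = {node["NodeName"]: node for node in existing_data.get("NetworkNodes", [])}
--     new_nodes = {node["NodeName"]: node for node in new_data.get("NetworkNodes", [])}
--
--     for new_node_name, new_node in new_nodes.items():
--         existing_node = existing_nodes.get(new_node_name)
--         if not existing_node or existing_node["IP"] != new_node["IP"]:
--             return True
--
--     for existing_node_name in existing_nodes:
--         if existing_node_name not in new_nodes: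
--             return True
--
--     return False
-- ===== SOURCE B (Python) =====
-- def has_network_data_changed(new_data, existing_data):
--     """Check if the network data has changed by comparing node IPs."""
--     def canonical(data):
--         pairs = []
--         seen = set()
--         for node in reversed(data.get("NetworkNodes", [])):
--             name = node["NodeName"]
--             if name not in seen:
--                 seen.add(name)
--                 pairs.append((name, node["IP"]))
--         pairs.sort(key=lambda p: p[0])
--         return pairs
--     return canonical(new_data) != canonical(existing_data)
-- ===== Notes on version B (the rewrite author's own statement) =====
-- stated objective: alternative
-- what changed: Replaces A's two directed passes over NodeName-keyed dicts (forward IP-compare loop plus backward membership loop) with a reverse scan that dedups nodes last-wins via a seen-set into (NodeName, IP) pairs, sorts each side by name, and compares the two canonical sorted lists for equality.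
-- outside the precondition, e.g. on has_network_data_changed({'NetworkNodes': [{'NodeName': 'a'}]}, {}): A returns True, B raises KeyError
import Mathlib
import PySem

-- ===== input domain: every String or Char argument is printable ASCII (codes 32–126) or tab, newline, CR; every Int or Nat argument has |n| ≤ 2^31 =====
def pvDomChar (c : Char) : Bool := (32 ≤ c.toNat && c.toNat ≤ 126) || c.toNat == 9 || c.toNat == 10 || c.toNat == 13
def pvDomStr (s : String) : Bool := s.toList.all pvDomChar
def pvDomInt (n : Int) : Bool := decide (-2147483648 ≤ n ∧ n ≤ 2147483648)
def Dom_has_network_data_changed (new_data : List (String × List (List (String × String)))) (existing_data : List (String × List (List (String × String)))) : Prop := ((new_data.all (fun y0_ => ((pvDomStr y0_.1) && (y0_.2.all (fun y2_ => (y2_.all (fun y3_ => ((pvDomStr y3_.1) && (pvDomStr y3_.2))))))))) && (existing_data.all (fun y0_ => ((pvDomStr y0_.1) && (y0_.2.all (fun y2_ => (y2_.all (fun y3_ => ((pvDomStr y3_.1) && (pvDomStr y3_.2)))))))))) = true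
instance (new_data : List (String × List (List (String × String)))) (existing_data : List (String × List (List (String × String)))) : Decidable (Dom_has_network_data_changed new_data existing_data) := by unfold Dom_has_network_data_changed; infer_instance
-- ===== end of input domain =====

-- B replaces A's two directed dict-lookup passes with a reverse-scan seen-set dedup into
-- (NodeName, IP) pairs, sorted by name and compared as canonical lists; objective: alternative.


-- ===== PORT A =====
-- node["K"] on a node given as an assoc list (a Python dict): first-match lookup
def pvNodeGet? (node : List (String × String)) (k : String) : Option String :=
  (PySem.Dict.mk node).get? k

-- data.get("NetworkNodes", [])
def pvNetworkNodes (data : List (String × List (List (String × String)))) : List (List (String × String)) :=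
  (PySem.Dict.mk data).getD "NetworkNodes" []

-- node["NodeName"] / node["IP"]; Python raises KeyError when missing — those inputs are outside Pre_, "" there
def pvNodeName (node : List (String × String)) : String := (pvNodeGet? node "NodeName").getD ""
def pvNodeIP (node : List (String × String)) : String := (pvNodeGet? node "IP").getD ""

-- {node["NodeName"]: node for node in nodes}
def pvNodesByName (nodes : List (List (String × String))) : PySem.Dict String (List (String × String)) :=
  nodes.foldl (fun d node => d.insert (pvNodeName node) node) PySem.Dict.empty

def has_network_data_changed (new_data : List (String × List (List (String × String)))) (existing_data : List (String × List (List (String × String)))) : Bool :=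
  let existing_nodes := pvNodesByName (pvNetworkNodes existing_data)
  let new_nodes := pvNodesByName (pvNetworkNodes new_data)
  -- first for-loop with early 'return True'
  if new_nodes.items.any (fun p =>
        match existing_nodes.get? p.1 with
        | none => true                                  -- 'not existing_node' (key missing)
        | some en => en.isEmpty                         -- 'not existing_node' (empty dict is falsy)
            || (pvNodeIP en != pvNodeIP p.2)) then true
  -- second for-loop with early 'return True'
  else if existing_nodes.items.any (fun p => !(new_nodes.contains p.1)) then true
  else false

-- ===== PORT B =====
-- the loop body of canonical(data): keep a node's (name, IP) only at the FIRST time its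
-- name is seen in the reversed scan (i.e. the LAST occurrence in the original order)
def pvStep (acc : List (String × String) × PySem.Set String) (node : List (String × String)) :
    List (String × String) × PySem.Set String :=
  let name := pvNodeName node
  if PySem.Set.contains acc.2 name then acc
  else (acc.1 ++ [(name, pvNodeIP node)], PySem.Set.add acc.2 name)

-- canonical(data): reverse scan with the seen-set, then pairs.sort(key=lambda p: p[0])
def pvCanonical (data : List (String × List (List (String × String)))) : List (String × String) :=
  PySem.List.sorted
    (((pvNetworkNodes data).reverse.foldl pvStep
        (([] : List (String × String)), (PySem.Set.empty : PySem.Set String))).1)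
    (fun p => p.1) false

def has_network_data_changed_alt (new_data : List (String × List (List (String × String)))) (existing_data : List (String × List (List (String × String)))) : Bool :=
  pvCanonical new_data != pvCanonical existing_data

-- ===== PRECONDITION & SPEC =====
-- Pre_ excludes malformed nodes lacking a "NodeName" or "IP" key: A raises KeyError on most of them, but on
-- some (e.g. a new-only node without "IP") A lazily returns True while B's eager pair-building raises KeyError.
def Pre_has_network_data_changed (new_data : List (String × List (List (String × String)))) (existing_data : List (String × List (List (String × String)))) : Prop :=
  (∀ node ∈ pvNetworkNodes new_data, (pvNodeGet? node "NodeName").isSome ∧ (pvNodeGet? node "IP").isSome) ∧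
  (∀ node ∈ pvNetworkNodes existing_data, (pvNodeGet? node "NodeName").isSome ∧ (pvNodeGet? node "IP").isSome)
instance (new_data : List (String × List (List (String × String)))) (existing_data : List (String × List (List (String × String)))) : Decidable (Pre_has_network_data_changed new_data existing_data) := by unfold Pre_has_network_data_changed; infer_instance

def pvWitness_has_network_data_changed : (List (String × List (List (String × String)))) × (List (String × List (List (String × String)))) :=
  ([("NetworkNodes", [[("NodeName", "a"), ("IP", "10.0.0.1")]])],
   [("NetworkNodes", [[("NodeName", "a"), ("IP", "10.0.0.2")]])])

def Spec_has_network_data_changed (new_data : List (String × List (List (String × String)))) (existing_data : List (String × List (List (String × String)))) (out : Bool) : Prop := out = has_network_data_changed_alt new_data existing_data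
instance (new_data : List (String × List (List (String × String)))) (existing_data : List (String × List (List (String × String)))) (out : Bool) : Decidable (Spec_has_network_data_changed new_data existing_data out) := by unfold Spec_has_network_data_changed; infer_instance

-- ===== CLAIM (what is proved, stated in full; the proofs are below) =====
def Claim_equal_has_network_data_changed : Prop := ∀ (new_data : List (String × List (List (String × String)))) (existing_data : List (String × List (List (String × String)))), Dom_has_network_data_changed new_data existing_data → Pre_has_network_data_changed new_data existing_data → Spec_has_network_data_changed new_data existing_data (has_network_data_changed new_data existing_data)

-- ===== LEMMAS AND PROOFS =====

-- B's name→IP map as a dict (proof device only: the canonical list of both ports is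
-- characterised through it, it appears in neither port's code path)
def pvIpOf (l : List (List (String × String))) : PySem.Dict String String :=
  l.foldl (fun d node => d.insert (pvNodeName node) (pvNodeIP node)) PySem.Dict.empty

-- first node of the list whose name is k, its IP (proof device)
def pvFirst : List (List (String × String)) → String → Option String
  | [], _ => none
  | n :: t, k => if pvNodeName n = k then some (pvNodeIP n) else pvFirst t k

-- the raw (pre-sort) pair list of B, abbreviated for the lemmas
def pvRawOf (l : List (List (String × String))) : List (String × String) :=
  (l.reverse.foldl pvStep (([] : List (String × String)), (PySem.Set.empty : PySem.Set String))).1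

theorem pvFirst_append (a : List (List (String × String))) (n : List (String × String)) (k : String) :
    pvFirst (a ++ [n]) k
      = (pvFirst a k).or (if pvNodeName n = k then some (pvNodeIP n) else none) := by
  induction a with
  | nil => simp [pvFirst]
  | cons m t ih =>
    by_cases h : pvNodeName m = k
    · simp [pvFirst, h]
    · simp [pvFirst, h, ih]

-- lookup in the last-wins dict = first match in the reversed list
theorem pv_get_eq_first (l : List (List (String × String))) (k : String) :
    (pvIpOf l).get? k = pvFirst l.reverse k := by
  suffices h : ∀ (d : PySem.Dict String String),
      (l.foldl (fun d node => d.insert (pvNodeName node) (pvNodeIP node)) d).get? k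
        = (pvFirst l.reverse k).or (d.get? k) by
    simpa [pvIpOf] using h PySem.Dict.empty
  induction l with
  | nil => intro d; simp [pvFirst]
  | cons n t ih =>
    intro d
    simp only [List.foldl_cons, List.reverse_cons]
    rw [ih, pvFirst_append, PySem.Dict.get?_insert]
    rcases hf : pvFirst t.reverse k with _ | v
    · by_cases h : pvNodeName n = k
      · simp [h, Option.or]
      · simp [h, Ne.symm h, Option.or]
    · simp [Option.or]

-- fold invariant of B's reverse-scan dedup loop
theorem pv_raw_inv (r : List (List (String × String)))
    (out : List (String × String)) (seen : PySem.Set String)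
    (hmem : ∀ x, x ∈ seen ↔ x ∈ out.map Prod.fst) (hnd : (out.map Prod.fst).Nodup) :
    ((((r.foldl pvStep (out, seen)).1).map Prod.fst).Nodup) ∧
    (∀ k v, (k, v) ∈ (r.foldl pvStep (out, seen)).1
      ↔ (k, v) ∈ out ∨ (k ∉ seen ∧ pvFirst r k = some v)) := by
  induction r generalizing out seen with
  | nil => exact ⟨hnd, by simp [pvFirst]⟩
  | cons n t ih =>
    simp only [List.foldl_cons]
    by_cases hc : pvNodeName n ∈ seen
    · have hstep : pvStep (out, seen) n = (out, seen) := by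
        simp [pvStep, hc]
      rw [hstep]
      obtain ⟨h1, h2⟩ := ih out seen hmem hnd
      refine ⟨h1, fun k v => (h2 k v).trans ?_⟩
      constructor
      · rintro (h | ⟨hk, hf⟩)
        · exact .inl h
        · refine .inr ⟨hk, ?_⟩
          have hne : pvNodeName n ≠ k := fun he => hk (he ▸ hc)
          simp [pvFirst, hne, hf]
      · rintro (h | ⟨hk, hf⟩)
        · exact .inl h
        · have hne : pvNodeName n ≠ k := fun he => hk (he ▸ hc)
          simp only [pvFirst, if_neg hne] at hf
          exact .inr ⟨hk, hf⟩
    · have hstep : pvStep (out, seen) n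
          = (out ++ [(pvNodeName n, pvNodeIP n)], PySem.Set.add seen (pvNodeName n)) := by
        simp [pvStep, hc]
      rw [hstep]
      have hnotkey : pvNodeName n ∉ out.map Prod.fst := fun h => hc ((hmem _).2 h)
      have hmem' : ∀ x, x ∈ PySem.Set.add seen (pvNodeName n)
          ↔ x ∈ (out ++ [(pvNodeName n, pvNodeIP n)]).map Prod.fst := by
        intro x
        rw [PySem.Set.mem_add seen (pvNodeName n) x]
        simp [hmem x]
      have hnd' : ((out ++ [(pvNodeName n, pvNodeIP n)]).map Prod.fst).Nodup := by
        simp only [List.map_append, List.map_cons, List.map_nil]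
        refine List.Nodup.append hnd (List.nodup_singleton _) ?_
        intro a ha hb
        simp only [List.mem_singleton] at hb
        exact hnotkey (hb ▸ ha)
      obtain ⟨h1, h2⟩ := ih _ _ hmem' hnd'
      refine ⟨h1, fun k v => (h2 k v).trans ?_⟩
      by_cases he : pvNodeName n = k
      · subst he
        constructor
        · rintro (h | ⟨hk, hf⟩)
          · rcases List.mem_append.1 h with h | h
            · exact absurd (List.mem_map_of_mem (f := Prod.fst) h) hnotkey
            · simp only [List.mem_singleton, Prod.mk.injEq] at h
              exact .inr ⟨hc, by simp [pvFirst, h.2]⟩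
          · exact absurd ((PySem.Set.mem_add seen (pvNodeName n) (pvNodeName n)).2 (.inr rfl)) hk
        · rintro (h | ⟨hk, hf⟩)
          · exact absurd (List.mem_map_of_mem (f := Prod.fst) h) hnotkey
          · have hf' : pvNodeIP n = v := by simpa [pvFirst] using hf
            exact .inl (List.mem_append.2 (.inr (by simp [hf'])))
      · constructor
        · rintro (h | ⟨hk, hf⟩)
          · rcases List.mem_append.1 h with h | h
            · exact .inl h
            · simp only [List.mem_singleton, Prod.mk.injEq] at h
              exact absurd h.1 (fun hh => he hh.symm)
          · have hk' : k ∉ seen := fun h => hk ((PySem.Set.mem_add seen (pvNodeName n) k).2 (.inl h))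
            exact .inr ⟨hk', by simp [pvFirst, he, hf]⟩
        · rintro (h | ⟨hk, hf⟩)
          · exact .inl (List.mem_append.2 (.inl h))
          · simp only [pvFirst, if_neg he] at hf
            refine .inr ⟨?_, hf⟩
            rw [PySem.Set.mem_add seen (pvNodeName n) k]
            rintro (h | h)
            · exact hk h
            · exact he h.symm

theorem pv_raw_nodup (l : List (List (String × String))) :
    ((pvRawOf l).map Prod.fst).Nodup :=
  (pv_raw_inv l.reverse [] PySem.Set.empty (by simp [PySem.Set.empty]) (by simp)).1

theorem pv_mem_raw (l : List (List (String × String))) (k v : String) :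
    (k, v) ∈ pvRawOf l ↔ (pvIpOf l).get? k = some v := by
  rw [pv_get_eq_first]
  have := (pv_raw_inv l.reverse [] PySem.Set.empty (by simp [PySem.Set.empty]) (by simp)).2 k v
  simpa [pvRawOf, PySem.Set.empty] using this

-- the canonical sorted pair list of a node list (proof name for B's per-side result)
def pvCanOf (l : List (List (String × String))) : List (String × String) :=
  PySem.List.sorted (pvRawOf l) (fun p => p.1) false

theorem pv_can_eq (data : List (String × List (List (String × String)))) :
    pvCanonical data = pvCanOf (pvNetworkNodes data) := rfl

theorem pv_mem_can (l : List (List (String × String))) (k v : String) :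
    (k, v) ∈ pvCanOf l ↔ (pvIpOf l).get? k = some v := by
  rw [pvCanOf, PySem.List.mem_sorted, pv_mem_raw]

theorem pv_can_nodup (l : List (List (String × String))) :
    ((pvCanOf l).map Prod.fst).Nodup := by
  have hp : (pvCanOf l).Perm (pvRawOf l) := PySem.List.sorted_perm _ _ _
  exact ((hp.map Prod.fst).nodup_iff).2 (pv_raw_nodup l)

theorem pv_can_pairwise_lt (l : List (List (String × String))) :
    (pvCanOf l).Pairwise (fun a b : String × String => a.1 < b.1) := by
  have hle : (pvCanOf l).Pairwise (fun a b : String × String => a.1 ≤ b.1) :=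
    PySem.List.sorted_pairwise _ _
  have hne : (pvCanOf l).Pairwise (fun a b : String × String => a.1 ≠ b.1) :=
    (List.pairwise_map).1 (pv_can_nodup l)
  exact (hle.and hne).imp (fun h => lt_of_le_of_ne h.1 h.2)

-- canonical lists are equal iff the name→IP maps agree pointwise
theorem pv_can_eq_iff_mapsEq (ln le : List (List (String × String))) :
    pvCanOf ln = pvCanOf le ↔ ∀ k, (pvIpOf ln).get? k = (pvIpOf le).get? k := by
  constructor
  · intro h k
    rcases hv : (pvIpOf ln).get? k with _ | v
    · rcases hw : (pvIpOf le).get? k with _ | w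
      · rfl
      · exfalso
        have : (k, w) ∈ pvCanOf ln := h ▸ (pv_mem_can le k w).2 hw
        rw [pv_mem_can, hv] at this; simp at this
    · have : (k, v) ∈ pvCanOf le := h ▸ (pv_mem_can ln k v).2 hv
      rw [pv_mem_can] at this
      exact this.symm
  · intro h
    have hperm : (pvCanOf ln).Perm (pvRawOf le) := by
      refine ((List.perm_ext_iff_of_nodup ?_ ?_).2 ?_)
      · exact List.Nodup.of_map _ (pv_can_nodup ln)
      · exact List.Nodup.of_map _ (pv_raw_nodup le)
      · rintro ⟨k, v⟩
        rw [show ((k, v) ∈ pvCanOf ln) ↔ _ from pv_mem_can ln k v,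
            show ((k, v) ∈ pvRawOf le) ↔ _ from pv_mem_raw le k v, h k]
    exact (PySem.List.sorted_eq_of_perm_of_pairwise_lt (pvRawOf le) (pvCanOf ln) (fun p => p.1) hperm (pv_can_pairwise_lt ln)).symm

-- every value of the fold-built node dict comes from the node list
theorem pv_val_mem_gen (l : List (List (String × String)))
    (d : PySem.Dict String (List (String × String))) {k : String} {v : List (String × String)}
    (h : (k, v) ∈ (l.foldl (fun d node => d.insert (pvNodeName node) node) d).items) :
    v ∈ l ∨ (k, v) ∈ d.items := by
  induction l generalizing d with
  | nil => simpa using h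
  | cons n t ih =>
    simp only [List.foldl_cons] at h
    rcases ih _ h with h1 | h1
    · exact .inl (List.mem_cons_of_mem _ h1)
    · rcases (PySem.Dict.mem_items_insert _ _ _ _).1 h1 with h2 | h2
      · exact .inl (by simp [Prod.ext_iff] at h2; simp [h2.2])
      · exact .inr h2.1

theorem pv_val_mem (l : List (List (String × String))) {k : String} {v : List (String × String)}
    (h : (k, v) ∈ (pvNodesByName l).items) : v ∈ l := by
  rcases pv_val_mem_gen l PySem.Dict.empty h with h1 | h1
  · exact h1
  · simp [PySem.Dict.empty] at h1

-- lookup in the IP dict is lookup in the node dict with pvNodeIP applied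
theorem pv_get_corr_gen (l : List (List (String × String)))
    (d : PySem.Dict String (List (String × String))) (d' : PySem.Dict String String)
    (h : ∀ k, d'.get? k = (d.get? k).map pvNodeIP) (k : String) :
    (l.foldl (fun d node => d.insert (pvNodeName node) (pvNodeIP node)) d').get? k
      = ((l.foldl (fun d node => d.insert (pvNodeName node) node) d).get? k).map pvNodeIP := by
  induction l generalizing d d' with
  | nil => simpa using h k
  | cons n t ih =>
    simp only [List.foldl_cons]
    exact ih _ _ (fun j => by
      rw [PySem.Dict.get?_insert, PySem.Dict.get?_insert]
      split_ifs with hj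
      · rfl
      · exact h j)

theorem pv_get_corr (l : List (List (String × String))) (k : String) :
    (pvIpOf l).get? k = ((pvNodesByName l).get? k).map pvNodeIP :=
  pv_get_corr_gen l PySem.Dict.empty PySem.Dict.empty (fun _ => rfl) k

-- the central lemma: A's two passes over name→node dicts are both silent iff the maps agree
theorem pv_key (ln le : List (List (String × String)))
    (hpe : ∀ node ∈ le, (pvNodeGet? node "NodeName").isSome ∧ (pvNodeGet? node "IP").isSome) :
    (((pvNodesByName ln).items.any (fun p =>
          match (pvNodesByName le).get? p.1 with
          | none => true
          | some en => en.isEmpty || (pvNodeIP en != pvNodeIP p.2)) = false)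
      ∧ ((pvNodesByName le).items.any (fun p => !((pvNodesByName ln).contains p.1)) = false))
    ↔ ∀ k, (pvIpOf ln).get? k = (pvIpOf le).get? k := by
  have hNnd : (pvNodesByName ln).keys.Nodup :=
    PySem.Dict.nodup_keys_foldl_insert_key ln pvNodeName (fun _ n => n) _ (by simp)
  have hEnd : (pvNodesByName le).keys.Nodup :=
    PySem.Dict.nodup_keys_foldl_insert_key le pvNodeName (fun _ n => n) _ (by simp)
  have hene : ∀ {k en}, (pvNodesByName le).get? k = some en → en.isEmpty = false := by
    intro k en h
    have hs := (hpe en (pv_val_mem le (PySem.Dict.mem_items_of_get?_eq_some _ h))).1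
    cases en with
    | nil =>
      have h0 : pvNodeGet? [] "NodeName" = none := rfl
      rw [h0] at hs; simp at hs
    | cons a t => rfl
  simp only [List.any_eq_false, Bool.not_eq_true]
  constructor
  · rintro ⟨h1, h2⟩ k
    rw [pv_get_corr, pv_get_corr]
    rcases hv : (pvNodesByName ln).get? k with _ | v
    · rcases he : (pvNodesByName le).get? k with _ | en
      · rfl
      · exfalso
        have h2' := h2 (k, en) (PySem.Dict.mem_items_of_get?_eq_some _ he)
        rw [Bool.not_eq_false'] at h2'
        have hk : k ∈ (pvNodesByName ln).keys := (PySem.Dict.contains_iff_mem_keys _ _).1 h2'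
        exact ((PySem.Dict.get?_eq_none_iff_not_mem_keys _ _).1 hv) hk
    · have h1' := h1 (k, v) (PySem.Dict.mem_items_of_get?_eq_some _ hv)
      rcases he : (pvNodesByName le).get? k with _ | en
      · simp [he] at h1'
      · simp only [he] at h1'
        simp only [Bool.or_eq_false_iff, bne_eq_false_iff_eq] at h1'
        simp [h1'.2]
  · intro h
    constructor
    · rintro ⟨k, v⟩ hp
      have hv : (pvNodesByName ln).get? k = some v :=
        PySem.Dict.get?_of_mem_items _ hp hNnd
      have h3 := h k
      rw [pv_get_corr, pv_get_corr, hv] at h3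
      rcases he : (pvNodesByName le).get? k with _ | en
      · rw [he] at h3; simp at h3
      · rw [he] at h3
        simp only [Option.map_some, Option.some.injEq] at h3
        simp [hene he, h3]
    · rintro ⟨k, v⟩ hp
      have hv : (pvNodesByName le).get? k = some v :=
        PySem.Dict.get?_of_mem_items _ hp hEnd
      have h3 := h k
      rw [pv_get_corr, pv_get_corr, hv] at h3
      rcases hn : (pvNodesByName ln).get? k with _ | w
      · rw [hn] at h3; simp at h3
      · rw [Bool.not_eq_false']
        apply (PySem.Dict.contains_iff_mem_keys _ _).2
        have hw : (k, w) ∈ (pvNodesByName ln).items :=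
          PySem.Dict.mem_items_of_get?_eq_some _ hn
        exact PySem.Dict.mem_keys_of_mem_items _ (p := (k, w)) hw


-- ===== VERDICT (by name: the statement is the Claim_ definition above) =====
theorem has_network_data_changed_spec : Claim_equal_has_network_data_changed := by
  intro new_data existing_data _hdom hpre
  unfold Spec_has_network_data_changed has_network_data_changed has_network_data_changed_alt
  rw [pv_can_eq, pv_can_eq]
  have hkey := pv_key (pvNetworkNodes new_data) (pvNetworkNodes existing_data) hpre.2
  have hcan := pv_can_eq_iff_mapsEq (pvNetworkNodes new_data) (pvNetworkNodes existing_data)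
  cases hcb : (pvCanOf (pvNetworkNodes new_data) != pvCanOf (pvNetworkNodes existing_data)) with
  | false =>
    rw [bne_eq_false_iff_eq] at hcb
    obtain ⟨h1, h2⟩ := hkey.2 (hcan.1 hcb)
    simp [h1, h2]
  | true =>
    have hne : ¬ (pvCanOf (pvNetworkNodes new_data) = pvCanOf (pvNetworkNodes existing_data)) := by
      intro h; rw [h] at hcb; simp at hcb
    cases ha1 : (pvNodesByName (pvNetworkNodes new_data)).items.any (fun p =>
          match (pvNodesByName (pvNetworkNodes existing_data)).get? p.1 with
          | none => true
          | some en => en.isEmpty || (pvNodeIP en != pvNodeIP p.2)) with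
    | true => simp [ha1]
    | false =>
      cases ha2 : (pvNodesByName (pvNetworkNodes existing_data)).items.any
          (fun p => !((pvNodesByName (pvNetworkNodes new_data)).contains p.1)) with
      | true => simp [ha1, ha2]
      | false => exact absurd (hcan.2 (hkey.1 ⟨ha1, ha2⟩)) hne
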